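-- pv_equiv track=rewrite | github.com/fgarofalo56/ucm-azure-native-demo | src/functions/services/text_converter.py | _strip_rtf
-- ===== SOURCE A (Python) =====
-- def _strip_rtf(text: str) -> str:
--     """Basic RTF markup stripping (extracts plain text content)."""
--     result = []
--     in_group = 0
--     i = 0
--     while i < len(text):
--         char = text[i]
--         if char == "{":
--             in_group += 1
--         elif char == "}":
--             in_group -= 1
--         elif char == "\\" and i + 1 < len(text):
--             next_char = text[i + 1]
--             if next_char == "\n":
--                 result.append("\n")
--                 i += 1
--             elif next_char in ("\\", "{", "}"):
--                 result.append(next_char)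
--                 i += 1
--             else:
--                 # Skip control word
--                 j = i + 1
--                 while j < len(text) and text[j].isalpha():
--                     j += 1
--                 if j < len(text) and text[j] == " ":
--                     j += 1
--                 i = j - 1
--         elif in_group <= 1:
--             result.append(char)
--         i += 1
--     return "".join(result)
-- ===== SOURCE B (Python) =====
-- import re
--
-- # Two-pass implementation: one regex pass tokenizes the RTF (control words,
-- # control symbols, braces, plain-text runs), then a render pass tracks group
-- # depth and emits text.
-- _TOKEN = re.compile(
--     r"(?P<word>\\[a-zA-Z]+ ?|\\ )"     # control word (eats one trailing space), or escaped space
--     r"|(?P<esc>\\[\\{}\n])"            # escaped backslash, brace or newline: literal character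
--     r"|(?P<stray>\\(?=[\s\S]))"        # backslash introducing no known construct: dropped
--     r"|(?P<open>\{)|(?P<close>\})"
--     r"|(?P<text>[^\\{}]+|\\)"          # run of plain text; a backslash at end of input escapes nothing
-- )
--
--
-- def _strip_rtf(text: str) -> str:
--     """Basic RTF markup stripping (extracts plain text content)."""
--     out = []
--     depth = 0
--     for m in _TOKEN.finditer(text):
--         kind = m.lastgroup
--         if kind == "open":
--             depth += 1
--         elif kind == "close":
--             depth -= 1
--         elif kind == "esc":
--             out.append(m.group()[1])
--         elif kind == "text" and depth <= 1:
--             out.append(m.group())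
--         # control words and stray backslashes contribute nothing
--     return "".join(out)
-- ===== Notes on version B (the rewrite author's own statement) =====
-- stated objective: idiomatic
-- what changed: Replaced A's single index-driven while-loop (with manual lookahead and an inner control-word scan) by a two-pass design: one regex alternation with named groups tokenizes the text into control words, control symbols, braces and plain-text runs, then a second pass over the tokens tracks group depth and emits payloads. The per-character Python-level loop work moves into the C regex engine.
import Mathlib
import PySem

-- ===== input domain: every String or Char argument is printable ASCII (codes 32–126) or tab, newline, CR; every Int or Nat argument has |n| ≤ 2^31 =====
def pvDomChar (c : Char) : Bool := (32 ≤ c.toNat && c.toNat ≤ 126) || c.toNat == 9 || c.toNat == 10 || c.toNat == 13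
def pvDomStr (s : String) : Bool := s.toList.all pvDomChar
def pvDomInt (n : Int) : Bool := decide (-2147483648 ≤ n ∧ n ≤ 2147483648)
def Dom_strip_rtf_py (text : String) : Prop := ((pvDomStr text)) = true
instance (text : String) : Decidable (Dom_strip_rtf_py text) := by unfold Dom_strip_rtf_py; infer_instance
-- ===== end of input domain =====

-- B rewrites A's index-driven scan as tokenize-then-render (two passes); same output, no speed claim.
-- Python's str.isalpha is ported as Char.isAlpha, exact on the ASCII domain Dom_strip_rtf_py.

-- ===== PORT A =====
-- inner `while j < len(text) and text[j].isalpha(): j += 1`, as the suffix it leaves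
def skipAlpha : List Char → List Char
  | [] => []
  | c :: r => if c.isAlpha then skipAlpha r else c :: r

-- `if j < len(text) and text[j] == " ": j += 1`
def dropOneSpace : List Char → List Char
  | [] => []
  | c :: r => if c = ' ' then r else c :: r

theorem skipAlpha_length_le (l : List Char) : (skipAlpha l).length ≤ l.length := by
  induction l with
  | nil => simp [skipAlpha]
  | cons c r ih => simp only [skipAlpha]; split <;> simp <;> omega

theorem dropOneSpace_length_le (l : List Char) : (dropOneSpace l).length ≤ l.length := by
  cases l with
  | nil => simp [dropOneSpace]
  | cons c r => simp only [dropOneSpace]; split <;> simp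

-- the while-loop of A: state = (in_group, remaining suffix); result built in order
def stripAux (inGroup : Int) : List Char → List Char
  | [] => []
  | ch :: rest =>
    if ch = '{' then stripAux (inGroup + 1) rest
    else if ch = '}' then stripAux (inGroup - 1) rest
    else if ch = '\\' then
      match rest with
      | [] => if inGroup ≤ 1 then [ch] else []   -- i+1 = len: falls to the `elif in_group <= 1` branch
      | nc :: rest2 =>
        if nc = '\n' then '\n' :: stripAux inGroup rest2
        else if nc = '\\' ∨ nc = '{' ∨ nc = '}' then nc :: stripAux inGroup rest2
        else stripAux inGroup (dropOneSpace (skipAlpha (nc :: rest2)))  -- skip control word; i = j - 1; i += 1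
    else if inGroup ≤ 1 then ch :: stripAux inGroup rest
    else stripAux inGroup rest
termination_by l => l.length
decreasing_by
  all_goals first
    | (simp only [List.length_cons]; omega)
    | (have h1 := skipAlpha_length_le (nc :: rest2)
       have h2 := dropOneSpace_length_le (skipAlpha (nc :: rest2))
       simp only [List.length_cons] at h1 ⊢
       omega)

def strip_rtf_py (text : String) : String := String.mk (stripAux 0 text.toList)

-- ===== PORT B =====
-- the token alphabet of B's regex alternation (named groups word/esc/stray/open/close/text)
inductive RtfTok : Type
  | lbrace : RtfTok              -- {
  | rbrace : RtfTok              -- }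
  | esc : Char → RtfTok          -- \\ \{ \} \<newline>: payload char
  | word : RtfTok                -- control word (+ optional space) or "\ ": emits nothing
  | stray : RtfTok               -- a backslash introducing no known construct: dropped
  | run : List Char → RtfTok     -- plain-text run [^\\{}]+ or a backslash at end of input
deriving DecidableEq, Repr

def bPlain (c : Char) : Bool := !(c == '\\' || c == '{' || c == '}')

-- pass 1: the regex scan, leftmost alternative first
def tokenizeB : List Char → List RtfTok
  | [] => []
  | c :: rest =>
    if c = '\\' then
      match rest with
      | [] => [RtfTok.run ['\\']]      -- text alternative `\\`: trailing backslash escapes nothing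
      | c2 :: r2 =>
        if c2.isAlpha then
          let r3 := (c2 :: r2).dropWhile Char.isAlpha
          RtfTok.word :: tokenizeB (if r3.head? = some ' ' then r3.tail else r3)
        else if c2 = '\\' ∨ c2 = '{' ∨ c2 = '}' ∨ c2 = '\n' then RtfTok.esc c2 :: tokenizeB r2
        else if c2 = ' ' then RtfTok.word :: tokenizeB r2
        else RtfTok.stray :: tokenizeB (c2 :: r2)
    else if c = '{' then RtfTok.lbrace :: tokenizeB rest
    else if c = '}' then RtfTok.rbrace :: tokenizeB rest
    else RtfTok.run (c :: rest.takeWhile bPlain) :: tokenizeB (rest.dropWhile bPlain)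
termination_by l => l.length
decreasing_by
  all_goals first
    | (simp only [List.length_cons]; omega)
    | (have hd := List.length_dropWhile_le Char.isAlpha (c2 :: r2)
       have ht : ((c2 :: r2).dropWhile Char.isAlpha).tail.length
           ≤ ((c2 :: r2).dropWhile Char.isAlpha).length := by
         cases ((c2 :: r2).dropWhile Char.isAlpha) <;> simp
       simp only [List.length_cons] at hd
       split <;> simp only [List.length_cons] <;> omega)
    | (have hd := List.length_dropWhile_le bPlain rest
       simp only [List.length_cons]
       omega)

-- pass 2: render the token list, tracking group depth
def renderB (depth : Int) : List RtfTok → List Char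
  | [] => []
  | RtfTok.lbrace :: ts => renderB (depth + 1) ts
  | RtfTok.rbrace :: ts => renderB (depth - 1) ts
  | RtfTok.esc c :: ts => c :: renderB depth ts
  | RtfTok.word :: ts => renderB depth ts
  | RtfTok.stray :: ts => renderB depth ts
  | RtfTok.run s :: ts => (if depth ≤ 1 then s else []) ++ renderB depth ts

def strip_rtf_py_alt (text : String) : String := String.mk (renderB 0 (tokenizeB text.toList))

-- ===== PRECONDITION & SPEC =====
def Spec_strip_rtf_py (text : String) (out : String) : Prop := out = strip_rtf_py_alt text
instance (text : String) (out : String) : Decidable (Spec_strip_rtf_py text out) := by unfold Spec_strip_rtf_py; infer_instance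

-- ===== CLAIM (what is proved, stated in full; the proofs are below) =====
def Claim_equal_strip_rtf_py : Prop := ∀ (text : String), Dom_strip_rtf_py text → Spec_strip_rtf_py text (strip_rtf_py text)

-- ===== LEMMAS AND PROOFS =====

theorem skipAlpha_eq_dropWhile (l : List Char) : skipAlpha l = l.dropWhile Char.isAlpha := by
  induction l with
  | nil => simp [skipAlpha]
  | cons c r ih => simp only [skipAlpha, List.dropWhile]; split <;> simp_all

theorem dropOneSpace_eq (l : List Char) :
    dropOneSpace l = if l.head? = some ' ' then l.tail else l := by
  cases l with
  | nil => simp [dropOneSpace]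
  | cons c r => simp only [dropOneSpace, List.head?_cons, List.tail_cons]; split <;> simp_all

-- a run of plain chars passes through stripAux unchanged (emitted iff depth ≤ 1)
theorem stripAux_run (d : Int) (t r : List Char) (ht : ∀ c ∈ t, bPlain c = true) :
    stripAux d (t ++ r) = (if d ≤ 1 then t else []) ++ stripAux d r := by
  induction t with
  | nil => simp
  | cons c t' ih =>
    have hc : bPlain c = true := ht c (by simp)
    have h1 : c ≠ '{' := by intro h; subst h; simp [bPlain] at hc
    have h2 : c ≠ '}' := by intro h; subst h; simp [bPlain] at hc
    have h3 : c ≠ '\\' := by intro h; subst h; simp [bPlain] at hc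
    have := ih (fun x hx => ht x (by simp [hx]))
    rw [List.cons_append, stripAux.eq_def]
    simp only [h1, h2, h3, if_false, reduceIte, this]
    split <;> simp

theorem main_equiv : ∀ (n : Nat) (l : List Char), l.length ≤ n → ∀ (d : Int),
    stripAux d l = renderB d (tokenizeB l) := by
  intro n
  induction n with
  | zero =>
    intro l h d
    have : l = [] := by cases l <;> simp_all
    subst this; simp [stripAux, tokenizeB, renderB]
  | succ n ih =>
    intro l h d
    cases l with
    | nil => simp [stripAux, tokenizeB, renderB]
    | cons c rest =>
      simp only [List.length_cons] at h
      by_cases hb : c = '\\'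
      · subst hb
        cases rest with
        | nil => simp [stripAux, tokenizeB, renderB]
        | cons c2 r2 =>
          simp only [List.length_cons] at h
          by_cases ha : c2.isAlpha
          · have h1 : c2 ≠ '\n' := by intro hh; subst hh; simp [Char.isAlpha, Char.isUpper, Char.isLower] at ha
            have h2 : c2 ≠ '\\' := by intro hh; subst hh; simp [Char.isAlpha, Char.isUpper, Char.isLower] at ha
            have h3 : c2 ≠ '{' := by intro hh; subst hh; simp [Char.isAlpha, Char.isUpper, Char.isLower] at ha
            have h4 : c2 ≠ '}' := by intro hh; subst hh; simp [Char.isAlpha, Char.isUpper, Char.isLower] at ha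
            have hlen : (if ((c2 :: r2).dropWhile Char.isAlpha).head? = some ' '
                then ((c2 :: r2).dropWhile Char.isAlpha).tail
                else (c2 :: r2).dropWhile Char.isAlpha).length ≤ n := by
              have hd := List.length_dropWhile_le Char.isAlpha (c2 :: r2)
              simp only [List.length_cons] at hd
              have ht : ((c2 :: r2).dropWhile Char.isAlpha).tail.length
                  ≤ ((c2 :: r2).dropWhile Char.isAlpha).length := by
                cases ((c2 :: r2).dropWhile Char.isAlpha) <;> simp
              split <;> omega
            simp only [stripAux, tokenizeB, renderB, ha, if_true, h1, h2, h3, h4,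
              if_false, or_self, false_or, reduceIte,
              skipAlpha_eq_dropWhile, dropOneSpace_eq]
            exact ih _ hlen d
          · by_cases hn : c2 = '\n'
            · subst hn
              simp only [stripAux, tokenizeB, renderB, reduceIte]
              simp [ih r2 (by omega) d, renderB]
            · by_cases he : c2 = '\\' ∨ c2 = '{' ∨ c2 = '}'
              · have h5 : (c2 = '\\' ∨ c2 = '{' ∨ c2 = '}' ∨ c2 = '\n') := by tauto
                simp only [stripAux, tokenizeB, renderB, ha, hn, he, h5, if_true, if_false,
                  Bool.false_eq_true, reduceIte]
                simp only [ih r2 (by omega) d]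
                rw [if_pos (show c2 = '\\' ∨ c2 = '{' ∨ c2 = '}' ∨ False by tauto)]
                simp [renderB]
              · by_cases hs : c2 = ' '
                · subst hs
                  have hsk : skipAlpha (' ' :: r2) = ' ' :: r2 := by simp [skipAlpha]
                  simp only [stripAux, tokenizeB, renderB, ha, hn, he, if_false,
                    Bool.false_eq_true, reduceIte, hsk, dropOneSpace]
                  simp [ih r2 (by omega) d, renderB]
                · have hsk : skipAlpha (c2 :: r2) = c2 :: r2 := by simp [skipAlpha, ha]
                  have hds : dropOneSpace (c2 :: r2) = c2 :: r2 := by simp [dropOneSpace, hs]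
                  have h5 : ¬(c2 = '\\' ∨ c2 = '{' ∨ c2 = '}' ∨ c2 = '\n') := by tauto
                  rw [stripAux.eq_def, tokenizeB.eq_def]
                  simp only [Char.reduceEq, reduceIte, ha, Bool.false_eq_true, if_false,
                    hn, he, h5, hs, hsk, hds]
                  rw [if_neg (show ¬(c2 = '\\' ∨ c2 = '{' ∨ c2 = '}' ∨ False) by tauto)]
                  simp only [renderB]
                  exact ih (c2 :: r2) (by simp; omega) d
      · by_cases hl : c = '{'
        · subst hl
          rw [stripAux.eq_def, tokenizeB.eq_def]
          simp only [Char.reduceEq, reduceIte, renderB]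
          exact ih rest (by omega) (d + 1)
        · by_cases hr : c = '}'
          · subst hr
            rw [stripAux.eq_def, tokenizeB.eq_def]
            simp only [Char.reduceEq, reduceIte, renderB]
            exact ih rest (by omega) (d - 1)
          · -- plain character: head of a run token
            have hsplit : rest = rest.takeWhile bPlain ++ rest.dropWhile bPlain :=
              (List.takeWhile_append_dropWhile).symm
            have hall : ∀ x ∈ rest.takeWhile bPlain, bPlain x = true :=
              fun x hx => List.mem_takeWhile_imp hx
            rw [stripAux.eq_def, tokenizeB.eq_def]
            simp only [hb, hl, hr, if_false, reduceIte, renderB]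
            rw [show stripAux d rest = stripAux d (rest.takeWhile bPlain ++ rest.dropWhile bPlain) by rw [← hsplit]]
            rw [stripAux_run d _ _ hall]
            rw [ih (rest.dropWhile bPlain) (by have := List.length_dropWhile_le bPlain rest; omega) d]
            by_cases hd : d ≤ 1 <;> simp [hd]

-- ===== VERDICT (by name: the statement is the Claim_ definition above) =====
theorem strip_rtf_py_spec : Claim_equal_strip_rtf_py := by
  intro text _
  unfold Spec_strip_rtf_py strip_rtf_py strip_rtf_py_alt
  rw [main_equiv text.toList.length text.toList le_rfl 0]
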